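-- pv_equiv track=rewrite | github.com/pvvx/TlsrComSwireWriter | ComSwireWriter825x.py | sws_code_blk
-- ===== SOURCE A (Python) =====
-- def sws_code_blk(blk):
-- 	pkt=[]
-- 	d = bytearray([0xd8,0xdf,0xdf,0xdf,0xdf])
-- 	for el in blk:
-- 		if (el & 0x80) != 0:
-- 			d[0] &= 0x1f
-- 		if (el & 0x40) != 0:
-- 			d[1] &= 0xf8
-- 		if (el & 0x20) != 0:
-- 			d[1] &= 0x1f
-- 		if (el & 0x10) != 0:
-- 			d[2] &= 0xf8
-- 		if (el & 0x08) != 0: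
-- 			d[2] &= 0x1f
-- 		if (el & 0x04) != 0:
-- 			d[3] &= 0xf8
-- 		if (el & 0x02) != 0:
-- 			d[3] &= 0x1f
-- 		if (el & 0x01) != 0:
-- 			d[4] &= 0xf8
-- 		pkt += d
-- 		d = bytearray([0xdf,0xdf,0xdf,0xdf,0xdf])
-- 	return pkt
-- ===== SOURCE B (Python) =====
-- _UPD = [(4, 0xf8), (3, 0x1f), (3, 0xf8), (2, 0x1f), (2, 0xf8), (1, 0x1f), (1, 0xf8), (0, 0x1f)]
--
-- def _enc(first, v):
--     d = [0xd8 if first else 0xdf, 0xdf, 0xdf, 0xdf, 0xdf]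
--     for k, (i, m) in enumerate(_UPD):
--         if (v >> k) & 1:
--             d[i] &= m
--     return d
--
-- _TBL_FIRST = [_enc(True, v) for v in range(256)]
-- _TBL_REST = [_enc(False, v) for v in range(256)]
--
-- def sws_code_blk(blk):
--     out = []
--     for i, el in enumerate(blk):
--         out += (_TBL_FIRST if i == 0 else _TBL_REST)[el & 0xff]
--     return out
-- ===== Notes on version B (the rewrite author's own statement) =====
-- stated objective: faster
-- what changed: Replaced the per-element chain of eight conditional bitmask updates on a fresh 5-byte buffer with two precomputed 256-entry lookup tables (one for the first element's 0xd8 base, one for the 0xdf base), indexed by el & 0xff.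
import Mathlib
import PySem

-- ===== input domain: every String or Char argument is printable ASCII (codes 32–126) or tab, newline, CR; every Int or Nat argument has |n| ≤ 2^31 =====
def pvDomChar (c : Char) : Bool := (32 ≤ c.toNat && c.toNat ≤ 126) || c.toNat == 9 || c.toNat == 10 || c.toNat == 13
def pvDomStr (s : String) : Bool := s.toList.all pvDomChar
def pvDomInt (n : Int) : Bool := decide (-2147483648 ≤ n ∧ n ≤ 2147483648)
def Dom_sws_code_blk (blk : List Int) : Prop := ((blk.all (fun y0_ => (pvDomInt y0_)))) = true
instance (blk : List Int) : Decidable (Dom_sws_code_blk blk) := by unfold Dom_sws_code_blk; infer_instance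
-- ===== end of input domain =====

-- B replaces the per-byte chain of eight masked in-place updates by two precomputed
-- 256-entry lookup tables (first byte vs rest) indexed by el & 0xff.

-- ===== PORT A =====
-- the loop body of A lifted to a named helper; state = (pkt, d)
def stepA (st : List Int × List Int) (el : Int) : List Int × List Int :=
  let d := st.2
  let d := if PySem.Int.band el 128 ≠ 0 then d.modify 0 (fun x => PySem.Int.band x 0x1f) else d
  let d := if PySem.Int.band el 64 ≠ 0 then d.modify 1 (fun x => PySem.Int.band x 0xf8) else d
  let d := if PySem.Int.band el 32 ≠ 0 then d.modify 1 (fun x => PySem.Int.band x 0x1f) else d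
  let d := if PySem.Int.band el 16 ≠ 0 then d.modify 2 (fun x => PySem.Int.band x 0xf8) else d
  let d := if PySem.Int.band el 8 ≠ 0 then d.modify 2 (fun x => PySem.Int.band x 0x1f) else d
  let d := if PySem.Int.band el 4 ≠ 0 then d.modify 3 (fun x => PySem.Int.band x 0xf8) else d
  let d := if PySem.Int.band el 2 ≠ 0 then d.modify 3 (fun x => PySem.Int.band x 0x1f) else d
  let d := if PySem.Int.band el 1 ≠ 0 then d.modify 4 (fun x => PySem.Int.band x 0xf8) else d
  (st.1 ++ d, [0xdf, 0xdf, 0xdf, 0xdf, 0xdf])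

def sws_code_blk (blk : List Int) : List Int :=
  (blk.foldl stepA ([], [0xd8, 0xdf, 0xdf, 0xdf, 0xdf])).1

-- ===== PORT B =====
def updTbl : List (Nat × Int) := [(4, 0xf8), (3, 0x1f), (3, 0xf8), (2, 0x1f), (2, 0xf8), (1, 0x1f), (1, 0xf8), (0, 0x1f)]

def encB (first : Bool) (v : Int) : List Int :=
  (PySem.List.enumerate updTbl).foldl
    (fun d p => if PySem.Int.band (v >>> p.1.toNat) 1 ≠ 0 then d.modify p.2.1 (fun x => PySem.Int.band x p.2.2) else d)
    [if first then 0xd8 else 0xdf, 0xdf, 0xdf, 0xdf, 0xdf]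

def tblFirst : List (List Int) := (PySem.List.pyRange 0 256 1).map (encB true)
def tblRest : List (List Int) := (PySem.List.pyRange 0 256 1).map (encB false)

-- the loop body of B; pyGetD [] totalizes the table lookup (the index is always in 0..255)
def stepB (out : List Int) (p : Int × Int) : List Int :=
  out ++ PySem.List.pyGetD (if p.1 == 0 then tblFirst else tblRest) (PySem.Int.band p.2 255) []

def sws_code_blk_alt (blk : List Int) : List Int :=
  (PySem.List.enumerate blk).foldl stepB []

-- ===== PRECONDITION & SPEC =====
def Spec_sws_code_blk (blk : List Int) (out : List Int) : Prop := out = sws_code_blk_alt blk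
instance (blk : List Int) (out : List Int) : Decidable (Spec_sws_code_blk blk out) := by unfold Spec_sws_code_blk; infer_instance

-- ===== CLAIM (what is proved, stated in full; the proofs are below) =====
def Claim_equal_sws_code_blk : Prop := ∀ (blk : List Int), Dom_sws_code_blk blk → Spec_sws_code_blk blk (sws_code_blk blk)

-- ===== LEMMAS AND PROOFS =====

theorem nat_and_pow (n k : ℕ) : n &&& 2 ^ k = n / 2 ^ k % 2 * 2 ^ k := by
  rw [Nat.and_two_pow, Nat.testBit_eq_decide_div_mod_eq]
  by_cases h : n / 2 ^ k % 2 = 1 <;> simp [h]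
  omega

-- Python's a & 2^k, as floor-div/mod arithmetic (valid for every Int a)
theorem band_pow (a m : Int) (k : Nat) (hm : m = ((2 ^ k : Nat) : Int)) :
    PySem.Int.band a m = a / m % 2 * m := by
  subst hm
  unfold PySem.Int.band
  by_cases ha : 0 ≤ a
  · rw [if_pos ha, if_pos (by positivity)]
    obtain ⟨n, rfl⟩ := Int.eq_ofNat_of_zero_le ha
    rw [Int.toNat_natCast, Int.toNat_natCast, nat_and_pow, Int.ofNat_ediv_ofNat]
    by_cases h : n / 2 ^ k % 2 = 1
    · have h' : ((n / 2 ^ k : Nat) : Int) % 2 = 1 := by omega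
      rw [h', h]; push_cast; ring
    · have h0 : n / 2 ^ k % 2 = 0 := by omega
      have h' : ((n / 2 ^ k : Nat) : Int) % 2 = 0 := by omega
      rw [h', h0]; simp
  · rw [if_neg ha, if_pos (by positivity)]
    have ha' : a = -((-a - 1).toNat : Int) - 1 := by omega
    set n := (-a - 1).toNat with hn
    rw [Int.toNat_natCast, Nat.land_comm, nat_and_pow]
    have hdiv : a / ((2 ^ k : Nat) : Int) = -((n / 2 ^ k : Nat) : Int) - 1 := by
      rw [ha', show (-(n : Int) - 1) = Int.negSucc n from by rw [Int.negSucc_eq]; ring,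
        Int.negSucc_ediv _ (by positivity)]
      rw [show ((n : Int)).ediv ((2 ^ k : Nat) : Int) = (n : Int) / ((2 ^ k : Nat) : Int) from rfl,
        Int.ofNat_ediv_ofNat]
      ring
    rw [hdiv]
    set q := n / 2 ^ k with hq
    have hle : q % 2 * 2 ^ k ≤ 2 ^ k := by
      rcases Nat.mod_two_eq_zero_or_one q with h | h <;> simp [h]
    rcases Nat.mod_two_eq_zero_or_one q with h | h
    · have h' : (-(q : Int) - 1) % 2 = 1 := by omega
      rw [h', h]
      push_cast [hle]
      simp
    · have h' : (-(q : Int) - 1) % 2 = 0 := by omega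
      rw [h', h]
      simp

theorem band255 (el : Int) : PySem.Int.band el 255 = el % 256 := by
  have hmod : ∀ n : ℕ, n &&& 255 = n % 256 := by
    intro n
    have := Nat.and_two_pow_sub_one_eq_mod n 8
    norm_num at this
    exact this
  unfold PySem.Int.band
  by_cases ha : 0 ≤ el
  · rw [if_pos ha, if_pos (by norm_num)]
    obtain ⟨n, rfl⟩ := Int.eq_ofNat_of_zero_le ha
    rw [Int.toNat_natCast, show (255 : Int).toNat = 255 from rfl, hmod]
    omega
  · rw [if_neg ha, if_pos (by norm_num)]
    have ha' : el = -((-el - 1).toNat : Int) - 1 := by omega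
    set n := (-el - 1).toNat with hn
    rw [show (255 : Int).toNat = 255 from rfl, Nat.land_comm, hmod]
    omega

-- table lookup = encoder applied to el mod 256
theorem tbl_get (first : Bool) (el : Int) :
    PySem.List.pyGetD (if first then tblFirst else tblRest) (PySem.Int.band el 255) []
      = encB first (el % 256) := by
  rw [band255]
  cases first <;>
    simp only [tblFirst, tblRest, if_true, if_false, Bool.false_eq_true] <;>
    exact PySem.List.pyGetD_map_pyRange_of_nonneg _ 256 _ []
      (Int.emod_nonneg el (by norm_num)) (Int.emod_lt_of_pos el (by norm_num))

-- one loop step of A = the table entry for el & 0xff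
set_option maxHeartbeats 2000000 in
theorem stepA_eq (pkt : List Int) (el : Int) (first : Bool) :
    stepA (pkt, [if first then 0xd8 else 0xdf, 0xdf, 0xdf, 0xdf, 0xdf]) el
      = (pkt ++ encB first (el % 256), [0xdf, 0xdf, 0xdf, 0xdf, 0xdf]) := by
  have a7 := band_pow el 128 7 (by norm_num)
  have a6 := band_pow el 64 6 (by norm_num)
  have a5 := band_pow el 32 5 (by norm_num)
  have a4 := band_pow el 16 4 (by norm_num)
  have a3 := band_pow el 8 3 (by norm_num)
  have a2 := band_pow el 4 2 (by norm_num)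
  have a1 := band_pow el 2 1 (by norm_num)
  have a0 := band_pow el 1 0 (by norm_num)
  simp only [stepA, encB, updTbl, PySem.List.enumerate_cons, PySem.List.enumerate_nil,
    List.foldl_cons, List.foldl_nil, Int.reduceAdd, Int.reduceToNat,
    a7, a6, a5, a4, a3, a2, a1, a0]
  norm_num
  have f7 : (el / 128 % 2 = 1) = (el % 256 / 128 % 2 = 1) := propext (by omega)
  have f6 : (el / 64 % 2 = 1) = (el % 256 / 64 % 2 = 1) := propext (by omega)
  have f5 : (el / 32 % 2 = 1) = (el % 256 / 32 % 2 = 1) := propext (by omega)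
  have f4 : (el / 16 % 2 = 1) = (el % 256 / 16 % 2 = 1) := propext (by omega)
  have f3 : (el / 8 % 2 = 1) = (el % 256 / 8 % 2 = 1) := propext (by omega)
  have f2 : (el / 4 % 2 = 1) = (el % 256 / 4 % 2 = 1) := propext (by omega)
  have f1 : (el / 2 % 2 = 1) = (el % 256 / 2 % 2 = 1) := propext (by omega)
  have f0 : (el % 2 = 1) = (el % 256 % 2 = 1) := propext (by omega)
  simp only [f7, f6, f5, f4, f3, f2, f1, f0]
  have hb0 : 0 ≤ el % 256 := Int.emod_nonneg el (by norm_num)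
  have hb1 : el % 256 < 256 := Int.emod_lt_of_pos el (by norm_num)
  generalize hj : el % 256 = j at hb0 hb1 ⊢
  generalize hbv : (if first = true then (216 : Int) else 223) = bv
  interval_cases j <;> rfl

theorem foldA_df (l : List Int) (pkt : List Int) :
    (l.foldl stepA (pkt, [0xdf, 0xdf, 0xdf, 0xdf, 0xdf])).1
      = pkt ++ l.flatMap (fun el => encB false (el % 256)) := by
  induction l generalizing pkt with
  | nil => simp
  | cons e t ih =>
      rw [List.foldl_cons,
        show stepA (pkt, [0xdf, 0xdf, 0xdf, 0xdf, 0xdf]) e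
          = (pkt ++ encB false (e % 256), [0xdf, 0xdf, 0xdf, 0xdf, 0xdf]) from stepA_eq pkt e false,
        ih]
      simp

theorem foldB_pos (l : List Int) (out : List Int) (s : Int) (hs : 1 ≤ s) :
    (PySem.List.enumerate l s).foldl stepB out
      = out ++ l.flatMap (fun el => encB false (el % 256)) := by
  induction l generalizing out s with
  | nil => simp [PySem.List.enumerate_nil]
  | cons e t ih =>
      rw [PySem.List.enumerate_cons, List.foldl_cons]
      have hz : (s == 0) = false := by simp; omega
      have hstep : stepB out (s, e) = out ++ encB false (e % 256) := by
        simp only [stepB, hz, if_false, Bool.false_eq_true]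
        have := tbl_get false e
        simp only [if_false, Bool.false_eq_true] at this
        rw [this]
      rw [hstep, ih _ (s + 1) (by omega)]
      simp

-- ===== VERDICT (by name: the statement is the Claim_ definition above) =====
theorem sws_code_blk_spec : Claim_equal_sws_code_blk := by
  intro blk _
  unfold Spec_sws_code_blk sws_code_blk sws_code_blk_alt
  cases blk with
  | nil => simp [PySem.List.enumerate_nil]
  | cons e t =>
      rw [List.foldl_cons,
        show stepA ([], [0xd8, 0xdf, 0xdf, 0xdf, 0xdf]) e
          = ([] ++ encB true (e % 256), [0xdf, 0xdf, 0xdf, 0xdf, 0xdf]) from stepA_eq [] e true,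
        foldA_df]
      rw [PySem.List.enumerate_cons, List.foldl_cons]
      have hstep : stepB [] (0, e) = [] ++ encB true (e % 256) := by
        simp only [stepB, show ((0 : Int) == 0) = true from rfl, if_true]
        have := tbl_get true e
        simp only [if_true] at this
        rw [this]
      rw [hstep, foldB_pos _ _ _ (by omega)]
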